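-- pv_equiv track=rewrite | github.com/LBistrev/SoftUni | Python Advanced/Multidimensional Lists - Exercise/06. Knight Game.py | knights_attacking
-- ===== SOURCE A (Python) =====
-- def find_all_knights(sub_matrix):
--     knights_positions = []
--     for i in range(len(sub_matrix)):
--         for j in range(len(sub_matrix)):
--             if sub_matrix[i][j] == "K":
--                 position = i, j
--                 knights_positions.append(position)
--
--     return knights_positions
--
-- def knights_attacking(matrix):
--     knight_position = find_all_knights(matrix)
--     for row, col in knight_position:
--         positions = [
--             (row - 2, col + 1),
--             (row - 1, col + 2),
--             (row + 1, col + 2),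
--             (row + 2, col + 1),
--             (row + 2, col - 1),
--             (row + 1, col - 2),
--             (row - 1, col - 2),
--             (row - 2, col - 1),
--         ]
--
--         for current_position in positions:
--             row, col = current_position
--             if not 0 <= row < len(matrix):
--                 continue
--             if not 0 <= col < len(matrix):
--                 continue
--             if matrix[row][col] == "K":
--                 return True
--     return False
-- ===== SOURCE B (Python) =====
-- def knights_attacking(matrix):
--     n = len(matrix)
--     knights = [(i, j) for i in range(n) for j in range(n) if matrix[i][j] == "K"]
--     for idx in range(len(knights)):
--         r1, c1 = knights[idx]
--         for r2, c2 in knights[idx + 1:]: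
--             d = (abs(r1 - r2), abs(c1 - c2))
--             if d == (1, 2) or d == (2, 1):
--                 return True
--     return False
-- ===== Notes on version B (the rewrite author's own statement) =====
-- stated objective: alternative
-- what changed: B replaces A's per-knight scan of the 8 destination offsets (with bounds checks and board lookups) by a pairwise test over the collected knight positions using the |dr|,|dc| ∈ {(1,2),(2,1)} knight-move geometry; no second board lookup is performed.
import Mathlib
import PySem

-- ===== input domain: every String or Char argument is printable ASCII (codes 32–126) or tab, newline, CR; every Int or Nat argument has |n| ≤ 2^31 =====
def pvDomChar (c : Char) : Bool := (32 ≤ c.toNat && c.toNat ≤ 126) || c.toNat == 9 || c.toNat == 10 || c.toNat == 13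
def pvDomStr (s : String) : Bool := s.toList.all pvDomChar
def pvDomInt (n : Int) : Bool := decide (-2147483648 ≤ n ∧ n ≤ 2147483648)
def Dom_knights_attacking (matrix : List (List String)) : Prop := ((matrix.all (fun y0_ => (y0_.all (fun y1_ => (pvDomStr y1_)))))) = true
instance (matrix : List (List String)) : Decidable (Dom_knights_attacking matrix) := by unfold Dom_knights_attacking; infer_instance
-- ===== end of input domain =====

-- B replaces A's per-knight scan of the 8 destination offsets (bounds checks + board lookups)
-- by a pairwise |dr|,|dc| ∈ {(1,2),(2,1)} test over the collected knight positions (objective: alternative).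

-- ===== PORT A =====
-- cell lookup matrix[i][j] for in-range nonnegative indices (exact inside Pre_; Python raises IndexError outside)
def pvCell (matrix : List (List String)) (i j : Nat) : String :=
  (matrix.getD i []).getD j ""

def find_all_knights (sub_matrix : List (List String)) : List (Int × Int) :=
  (List.range sub_matrix.length).foldl (fun acc i =>
    (List.range sub_matrix.length).foldl (fun acc j =>
      if pvCell sub_matrix i j = "K" then acc ++ [((i : Int), (j : Int))] else acc) acc) []

-- the 8 candidate destinations computed from one knight position (A's `positions` list)
def pvPositions (row col : Int) : List (Int × Int) :=
  [(row - 2, col + 1), (row - 1, col + 2), (row + 1, col + 2), (row + 2, col + 1),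
   (row + 2, col - 1), (row + 1, col - 2), (row - 1, col - 2), (row - 2, col - 1)]

-- A's inner-loop body: bounds checks (continue) then board lookup
def pvCheck (matrix : List (List String)) (p : Int × Int) : Bool :=
  if ¬ (0 ≤ p.1 ∧ p.1 < (matrix.length : Int)) then false
  else if ¬ (0 ≤ p.2 ∧ p.2 < (matrix.length : Int)) then false
  else pvCell matrix p.1.toNat p.2.toNat = "K"

def knights_attacking (matrix : List (List String)) : Bool :=
  (find_all_knights matrix).any (fun rc => (pvPositions rc.1 rc.2).any (pvCheck matrix))

-- ===== PORT B =====
-- B's comprehension collecting the knight coordinates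
def pvKnightsB (matrix : List (List String)) : List (Int × Int) :=
  (List.range matrix.length).flatMap (fun i =>
    (List.range matrix.length).filterMap (fun j =>
      if pvCell matrix i j = "K" then some ((i : Int), (j : Int)) else none))

-- B's pair test: d = (abs(r1-r2), abs(c1-c2)); d == (1,2) or d == (2,1)
def pvPairAttack (p q : Int × Int) : Bool :=
  let d := ((p.1 - q.1).natAbs, (p.2 - q.2).natAbs)
  d = (1, 2) ∨ d = (2, 1)

-- B's index loop over knights with the knights[idx+1:] inner slice
def pvPairScan : List (Int × Int) → Bool
  | [] => false
  | p :: rest => rest.any (fun q => pvPairAttack p q) || pvPairScan rest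

def knights_attacking_alt (matrix : List (List String)) : Bool :=
  pvPairScan (pvKnightsB matrix)

-- ===== PRECONDITION & SPEC =====
-- Pre_ excludes exactly the ragged inputs on which Python A raises IndexError
-- (some row shorter than the number of rows); both A and B raise there.
def Pre_knights_attacking (matrix : List (List String)) : Prop :=
  ∀ row ∈ matrix, matrix.length ≤ row.length

instance (matrix : List (List String)) : Decidable (Pre_knights_attacking matrix) := by
  unfold Pre_knights_attacking; infer_instance

def pvWitness_knights_attacking : List (List String) := [["K", "."], [".", "K"]]

def Spec_knights_attacking (matrix : List (List String)) (out : Bool) : Prop := out = knights_attacking_alt matrix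
instance (matrix : List (List String)) (out : Bool) : Decidable (Spec_knights_attacking matrix out) := by unfold Spec_knights_attacking; infer_instance

-- ===== CLAIM (what is proved, stated in full; the proofs are below) =====
def Claim_equal_knights_attacking : Prop := ∀ (matrix : List (List String)), Dom_knights_attacking matrix → Pre_knights_attacking matrix → Spec_knights_attacking matrix (knights_attacking matrix)

-- ===== LEMMAS AND PROOFS =====

-- the two collectors produce the same list
theorem pvCollect_eq (m : List (List String)) : find_all_knights m = pvKnightsB m := by
  unfold find_all_knights pvKnightsB
  have h1 : ∀ (i : Nat) (acc : List (Int × Int)),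
      (List.range m.length).foldl (fun acc j =>
        if pvCell m i j = "K" then acc ++ [((i : Int), (j : Int))] else acc) acc
      = acc ++ (List.range m.length).filterMap (fun j =>
          if pvCell m i j = "K" then some ((i : Int), (j : Int)) else none) := by
    intro i acc
    induction (List.range m.length) generalizing acc with
    | nil => simp
    | cons j js ih =>
      simp only [List.foldl_cons, List.filterMap_cons]
      by_cases h : pvCell m i j = "K" <;> simp [h, ih]
  calc (List.range m.length).foldl (fun acc i =>
        (List.range m.length).foldl (fun acc j =>
          if pvCell m i j = "K" then acc ++ [((i : Int), (j : Int))] else acc) acc) []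
      = (List.range m.length).foldl (fun acc i =>
          acc ++ (List.range m.length).filterMap (fun j =>
            if pvCell m i j = "K" then some ((i : Int), (j : Int)) else none)) [] := by
        apply PySem.List.foldl_congr_mem; intro acc x _; exact h1 x acc
    _ = _ := by
        rw [PySem.List.foldl_append_eq_flatMap]; simp

-- membership in the knight list, in Int coordinates
theorem pvMem_knights (m : List (List String)) (r c : Int) :
    ((r, c) ∈ pvKnightsB m) ↔
      (0 ≤ r ∧ r < (m.length : Int) ∧ 0 ≤ c ∧ c < (m.length : Int) ∧
        pvCell m r.toNat c.toNat = "K") := by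
  unfold pvKnightsB
  simp only [List.mem_flatMap, List.mem_filterMap, List.mem_range]
  constructor
  · rintro ⟨i, hi, j, hj, hok⟩
    split at hok
    · rename_i hc
      cases hok
      refine ⟨by positivity, ?_, by positivity, ?_, ?_⟩ <;>
        simp_all [Int.toNat_natCast]
    · exact absurd hok (by simp)
  · rintro ⟨hr0, hrn, hc0, hcn, hK⟩
    refine ⟨r.toNat, by omega, c.toNat, by omega, ?_⟩
    simp [hK]
    constructor <;> omega

-- A's destination-offset membership coincides with B's geometry test
theorem pvPos_mem (row col : Int) (q : Int × Int) :
    (q ∈ pvPositions row col) ↔ pvPairAttack (row, col) q = true := by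
  obtain ⟨qr, qc⟩ := q
  simp only [pvPositions, pvPairAttack, List.mem_cons, List.not_mem_nil, or_false,
    Prod.mk.injEq, decide_eq_true_eq]
  omega

theorem pvPairAttack_irrefl (p : Int × Int) : pvPairAttack p p = false := by
  simp [pvPairAttack]

theorem pvPairAttack_symm (p q : Int × Int) : pvPairAttack p q = pvPairAttack q p := by
  simp only [pvPairAttack, decide_eq_decide, Prod.mk.injEq]
  omega

-- B's triangular scan finds a pair iff some (ordered) pair of listed knights attacks
theorem pvPairScan_iff (l : List (Int × Int)) :
    pvPairScan l = true ↔ ∃ p ∈ l, ∃ q ∈ l, pvPairAttack p q = true := by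
  induction l with
  | nil => simp [pvPairScan]
  | cons x rest ih =>
    simp only [pvPairScan, Bool.or_eq_true, List.any_eq_true, ih]
    constructor
    · rintro (⟨q, hq, hpq⟩ | ⟨p, hp, q, hq, hpq⟩)
      · exact ⟨x, by simp, q, by simp [hq], hpq⟩
      · exact ⟨p, by simp [hp], q, by simp [hq], hpq⟩
    · rintro ⟨p, hp, q, hq, hpq⟩
      rcases List.mem_cons.1 hp with hpx | hpr
      · rcases List.mem_cons.1 hq with hqx | hqr
        · subst hpx; subst hqx
          exact absurd hpq (by simp [pvPairAttack_irrefl])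
        · subst hpx; exact Or.inl ⟨q, hqr, hpq⟩
      · rcases List.mem_cons.1 hq with hqx | hqr
        · subst hqx; exact Or.inl ⟨p, hpr, (pvPairAttack_symm q p).symm ▸ hpq⟩
        · exact Or.inr ⟨p, hpr, q, hqr, hpq⟩

-- A's inner check succeeds exactly on listed knights
theorem pvCheck_iff (m : List (List String)) (q : Int × Int) :
    pvCheck m q = true ↔ q ∈ pvKnightsB m := by
  obtain ⟨qr, qc⟩ := q
  rw [pvMem_knights]
  unfold pvCheck
  split
  · rename_i h; simp only [Bool.false_eq_true, false_iff]; tauto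
  · split
    · rename_i h; simp only [Bool.false_eq_true, false_iff]; tauto
    · rename_i h1 h2
      simp only [decide_eq_true_eq]
      constructor
      · intro hK; exact ⟨by tauto, by tauto, by tauto, by tauto, hK⟩
      · tauto

-- ===== VERDICT (by name: the statement is the Claim_ definition above) =====
theorem knights_attacking_spec : Claim_equal_knights_attacking := by
  intro m _ _
  unfold Spec_knights_attacking knights_attacking knights_attacking_alt
  rw [pvCollect_eq]
  rw [Bool.eq_iff_iff]
  rw [pvPairScan_iff]
  simp only [List.any_eq_true]
  constructor
  · rintro ⟨⟨pr, pc⟩, hp, q, hq, hchk⟩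
    exact ⟨(pr, pc), hp, q, (pvCheck_iff m q).1 hchk, (pvPos_mem pr pc q).1 hq⟩
  · rintro ⟨⟨pr, pc⟩, hp, q, hq, hpq⟩
    exact ⟨(pr, pc), hp, q, (pvPos_mem pr pc q).2 hpq, (pvCheck_iff m q).2 hq⟩
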